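-- pv_equiv track=rewrite | github.com/augustin-ploteanu/LFA_Labs | Labs/5_NormalChomskyForm/Lab5.py | _generate_nullable_variants
-- ===== SOURCE A (Python) =====
-- from typing import List, Dict, Set, Tuple
--
-- def _generate_nullable_variants(rule: List[str], nullable: Set[str]) -> Set[Tuple[str]]:
--     from itertools import combinations
--     positions = [i for i, sym in enumerate(rule) if sym in nullable]
--     variants = set()
--     for i in range(0, len(positions) + 1):
--         for subset in combinations(positions, i):
--             temp = [sym for idx, sym in enumerate(rule) if idx not in subset]
--             if temp:
--                 variants.add(tuple(temp))
--             else: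
--                 variants.add(('ε',))
--     return variants
-- ===== SOURCE B (Python) =====
-- def _generate_nullable_variants(rule, nullable):
--     # Fold over the rule from the right, keeping buckets[k] = all variants of the
--     # current suffix with exactly k nullable symbols dropped.  No position subsets
--     # are ever enumerated.
--     buckets = [[()]]
--     for sym in reversed(rule):
--         kept = [[(sym,) + p for p in bk] for bk in buckets]
--         if sym in nullable:
--             buckets = [prev + cur for prev, cur in zip([[]] + buckets, kept + [[]])]
--         else:
--             buckets = kept
--     return {p if p else ('ε',) for bk in buckets for p in bk}
-- ===== Notes on version B (the rewrite author's own statement) =====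
-- stated objective: alternative
-- what changed: Instead of enumerating subsets of nullable positions with itertools.combinations, B folds over the rule from the right, maintaining buckets of partial suffix variants indexed by the number of dropped symbols; no position list or index subsets are ever materialized.
import Mathlib
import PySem

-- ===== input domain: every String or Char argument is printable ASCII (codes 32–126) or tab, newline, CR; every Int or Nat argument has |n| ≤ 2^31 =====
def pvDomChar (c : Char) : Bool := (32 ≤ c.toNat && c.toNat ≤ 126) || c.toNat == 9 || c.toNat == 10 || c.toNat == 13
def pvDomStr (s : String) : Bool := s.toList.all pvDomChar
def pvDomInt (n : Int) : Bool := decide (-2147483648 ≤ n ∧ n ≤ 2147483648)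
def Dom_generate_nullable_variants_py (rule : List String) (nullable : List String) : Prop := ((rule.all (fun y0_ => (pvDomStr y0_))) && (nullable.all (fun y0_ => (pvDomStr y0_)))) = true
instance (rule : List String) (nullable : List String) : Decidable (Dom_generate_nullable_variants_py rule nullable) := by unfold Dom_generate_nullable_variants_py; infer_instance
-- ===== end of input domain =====

-- B replaces the itertools.combinations enumeration of drop-position subsets by a right-to-left
-- fold over the rule maintaining buckets of partial suffix variants indexed by drop count
-- (alternative decomposition; no position subsets are materialized; same Python variant set).
-- Both functions return a Python set; the Lean lists hold its distinct elements in insertion order.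

-- ===== PORT A =====
-- itertools.combinations(xs, i): hand port, exact (lexicographic order of i-element subsequences)
def pvCombs : Nat → List Int → List (List Int)
  | 0, _ => [[]]
  | _ + 1, [] => []
  | i + 1, x :: xs => (pvCombs i xs).map (fun c => x :: c) ++ pvCombs (i + 1) xs

-- temp = [sym for idx, sym in enumerate(rule) if idx not in subset]
def pvTemp (rule : List String) (subset : List Int) : List String :=
  ((PySem.List.enumerate rule 0).filter (fun p => !(subset.contains p.1))).map (fun p => p.2)

-- if temp: variants.add(tuple(temp)) else: variants.add(('ε',))
def pvAdd (v : PySem.Set (List String)) (rule : List String) (subset : List Int) : PySem.Set (List String) :=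
  let temp := pvTemp rule subset
  if temp ≠ [] then PySem.Set.add v temp else PySem.Set.add v ["ε"]

def generate_nullable_variants_py (rule : List String) (nullable : List String) : List (List String) :=
  let positions : List Int :=
    ((PySem.List.enumerate rule 0).filter (fun p => nullable.contains p.2)).map (fun p => p.1)
  (PySem.List.pyRange 0 ((positions.length : Int) + 1) 1).foldl
    (fun v i => (pvCombs i.toNat positions).foldl (fun v subset => pvAdd v rule subset) v)
    PySem.Set.empty

-- ===== PORT B =====
-- variants.add(p if p else ('ε',))
def pvBAdd (v : PySem.Set (List String)) (p : List String) : PySem.Set (List String) :=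
  if p ≠ [] then PySem.Set.add v p else PySem.Set.add v ["ε"]

-- the 'for sym in reversed(rule)' loop of Source B, as structural recursion (= fold from the right):
-- buckets[k] = variants of the current suffix with exactly k symbols dropped
def pvBuckets (nullable : List String) : List String → List (List (List String))
  | [] => [[[]]]
  | sym :: rest =>
    let buckets := pvBuckets nullable rest
    let kept := buckets.map (fun bk => bk.map (fun p => sym :: p))
    if nullable.contains sym then
      List.zipWith (· ++ ·) ([] :: buckets) (kept ++ [[]])
    else kept

def generate_nullable_variants_py_alt (rule : List String) (nullable : List String) : List (List String) :=
  (pvBuckets nullable rule).foldl (fun v bk => bk.foldl pvBAdd v) PySem.Set.empty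

-- ===== PRECONDITION & SPEC =====
def Spec_generate_nullable_variants_py (rule : List String) (nullable : List String) (out : List (List String)) : Prop := out = generate_nullable_variants_py_alt rule nullable
instance (rule : List String) (nullable : List String) (out : List (List String)) : Decidable (Spec_generate_nullable_variants_py rule nullable out) := by unfold Spec_generate_nullable_variants_py; infer_instance

-- ===== CLAIM (what is proved, stated in full; the proofs are below) =====
def Claim_equal_generate_nullable_variants_py : Prop := ∀ (rule : List String) (nullable : List String), Dom_generate_nullable_variants_py rule nullable → Spec_generate_nullable_variants_py rule nullable (generate_nullable_variants_py rule nullable)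

-- ===== LEMMAS AND PROOFS =====

-- A's positions list / temp list with an arbitrary enumeration offset n (n = 0 in the port)
def pvPos (nullable : List String) (n : Int) (rule : List String) : List Int :=
  ((PySem.List.enumerate rule n).filter (fun p => nullable.contains p.2)).map (fun p => p.1)

def pvTempN (n : Int) (rule : List String) (s : List Int) : List String :=
  ((PySem.List.enumerate rule n).filter (fun p => !(s.contains p.1))).map (fun p => p.2)

-- the bucket list [pvCombs 0 ps, …, pvCombs (len ps) ps] built by the same zipWith recursion as B
def pvCB : List Int → List (List (List Int))
  | [] => [[[]]]
  | x :: xs => List.zipWith (· ++ ·) ([] :: (pvCB xs).map (List.map (fun s => x :: s))) (pvCB xs ++ [[]])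

theorem pvCombs_eq_nil : ∀ (r : List Int) (d : Nat), r.length < d → pvCombs d r = [] := by
  intro r
  induction r with
  | nil => intro d h; cases d with | zero => omega | succ d => rfl
  | cons x xs ih =>
    intro d h
    cases d with
    | zero => omega
    | succ d =>
      simp only [pvCombs, List.append_eq_nil_iff, List.map_eq_nil_iff]
      exact ⟨ih d (by simp at h; omega), ih (d + 1) (by simp at h; omega)⟩

theorem length_pvCB : ∀ ps : List Int, (pvCB ps).length = ps.length + 1 := by
  intro ps
  induction ps with
  | nil => rfl
  | cons x xs ih => simp [pvCB, ih]

theorem pvCB_eq : ∀ ps : List Int, pvCB ps = (List.range (ps.length + 1)).map (fun k => pvCombs k ps) := by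
  intro ps
  induction ps with
  | nil => rfl
  | cons x xs ih =>
    apply List.ext_getElem
    · simp [length_pvCB]
    · intro i h1 h2
      simp only [pvCB, ih]
      rw [List.getElem_zipWith]
      simp only [List.getElem_map, List.getElem_range]
      cases i with
      | zero => simp [pvCombs]
      | succ j =>
        have hj : j < xs.length + 1 := by
          have := h1; simp [pvCB, ih] at this; omega
        simp only [List.getElem_cons_succ, List.getElem_map]
        by_cases hlt : j + 1 < xs.length + 1
        · rw [List.getElem_append_left (by simpa using hlt)]
          simp [pvCombs, List.getElem_range]
        · have hje : j = xs.length := by omega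
          rw [List.getElem_append_right (by simp [List.length_map, List.length_range]; omega)]
          subst hje
          simp [pvCombs, pvCombs_eq_nil xs (xs.length + 1) (by omega), List.getElem_range]

theorem mem_pvCombs : ∀ (ps : List Int) (k : Nat) (s : List Int), s ∈ pvCombs k ps → ∀ x ∈ s, x ∈ ps := by
  intro ps
  induction ps with
  | nil =>
    intro k s hs x hx
    cases k with
    | zero => simp [pvCombs] at hs; subst hs; simp at hx
    | succ k => simp [pvCombs] at hs
  | cons y ys ih =>
    intro k s hs x hx
    cases k with
    | zero => simp [pvCombs] at hs; subst hs; simp at hx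
    | succ k =>
      simp only [pvCombs, List.mem_append, List.mem_map] at hs
      rcases hs with ⟨t, ht, rfl⟩ | hs
      · rcases List.mem_cons.mp hx with rfl | hx
        · exact List.mem_cons_self
        · exact List.mem_cons_of_mem _ (ih k t ht x hx)
      · exact List.mem_cons_of_mem _ (ih (k + 1) s hs x hx)

theorem pvTempN_cons (n : Int) (sym : String) (rest : List String) (s : List Int) :
    pvTempN n (sym :: rest) s =
      if s.contains n then pvTempN (n + 1) rest s else sym :: pvTempN (n + 1) rest s := by
  simp only [pvTempN, PySem.List.enumerate_cons, List.filter_cons]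
  cases h : s.contains n <;> simp [h]

theorem pvTempN_drop_lt : ∀ (rule : List String) (n m : Int) (s : List Int), m < n →
    pvTempN n rule (m :: s) = pvTempN n rule s := by
  intro rule
  induction rule with
  | nil => intro n m s _; rfl
  | cons sym rest ih =>
    intro n m s hmn
    rw [pvTempN_cons, pvTempN_cons]
    have hne : (m == n) = false := by simp; omega
    simp only [List.contains_cons, hne, Bool.false_or]
    cases h : s.contains n <;> simp [h, ih (n + 1) m s (by omega)] <;> omega

theorem pvPos_cons (nullable : List String) (n : Int) (sym : String) (rest : List String) :
    pvPos nullable n (sym :: rest) =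
      if nullable.contains sym then n :: pvPos nullable (n + 1) rest else pvPos nullable (n + 1) rest := by
  simp only [pvPos, PySem.List.enumerate_cons, List.filter_cons]
  cases h : nullable.contains sym <;> simp [h]

theorem mem_pvPos_le : ∀ (rule : List String) (nullable : List String) (n x : Int),
    x ∈ pvPos nullable n rule → n ≤ x := by
  intro rule
  induction rule with
  | nil => intro nullable n x hx; simp [pvPos, PySem.List.enumerate] at hx
  | cons sym rest ih =>
    intro nullable n x hx
    rw [pvPos_cons] at hx
    by_cases h : nullable.contains sym = true
    · rw [if_pos h, List.mem_cons] at hx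
      rcases hx with rfl | hx
      · omega
      · have := ih nullable (n + 1) x hx; omega
    · rw [if_neg h] at hx
      have := ih nullable (n + 1) x hx; omega

-- elements of any bucket of pvCB (pvPos nullable (n+1) rest) do not contain n
theorem not_contains_of_mem_pvCB (nullable : List String) (rest : List String) (n : Int)
    (bk : List (List Int)) (hbk : bk ∈ pvCB (pvPos nullable (n + 1) rest))
    (s : List Int) (hs : s ∈ bk) : s.contains n = false := by
  rw [pvCB_eq] at hbk
  rcases List.mem_map.mp hbk with ⟨k, _, rfl⟩
  by_contra h
  have hmem : n ∈ s := by
    cases hcn : s.contains n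
    · rw [hcn] at h; exact absurd rfl h
    · simpa using hcn
  have := mem_pvPos_le rest nullable (n + 1) n (mem_pvCombs _ k s hs n hmem)
  omega

-- B's buckets are the pvCB bucket list mapped through A's temp extraction
theorem pvBuckets_char : ∀ (rule : List String) (nullable : List String) (n : Int),
    pvBuckets nullable rule = (pvCB (pvPos nullable n rule)).map (List.map (pvTempN n rule)) := by
  intro rule
  induction rule with
  | nil => intro nullable n; rfl
  | cons sym rest ih =>
    intro nullable n
    have IH := ih nullable (n + 1)
    have hkept : (pvBuckets nullable rest).map (fun bk => bk.map (fun p => sym :: p)) =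
        (pvCB (pvPos nullable (n + 1) rest)).map (List.map (pvTempN n (sym :: rest))) := by
      rw [IH, List.map_map]
      apply List.map_congr_left
      intro bk hbk
      simp only [Function.comp, List.map_map]
      apply List.map_congr_left
      intro s hs
      have hc' : n ∉ s := by simpa using not_contains_of_mem_pvCB nullable rest n bk hbk s hs
      simp [Function.comp, pvTempN_cons, hc']
    by_cases h : nullable.contains sym = true
    · have hp : pvPos nullable n (sym :: rest) = n :: pvPos nullable (n + 1) rest := by
        rw [pvPos_cons, if_pos h]
      have e1 : ([] : List (List String)) :: pvBuckets nullable rest =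
          (([] : List (List Int)) :: (pvCB (pvPos nullable (n + 1) rest)).map (List.map (fun s => n :: s))).map
            (List.map (pvTempN n (sym :: rest))) := by
        have hfun : (fun s => pvTempN n (sym :: rest) (n :: s)) = pvTempN (n + 1) rest := by
          funext s
          rw [pvTempN_cons]
          simp only [List.contains_cons, BEq.refl, Bool.true_or, if_true]
          exact pvTempN_drop_lt rest (n + 1) n s (by omega)
        rw [IH]
        simp only [List.map_cons, List.map_nil, List.map_map]
        rw [show (List.map (pvTempN n (sym :: rest)) ∘ List.map (fun s => n :: s)) =
            List.map (pvTempN (n + 1) rest) by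
          funext bk
          simp only [Function.comp_apply, List.map_map]
          exact List.map_congr_left fun a _ => congrFun hfun a]
      have e2 : (pvBuckets nullable rest).map (fun bk => bk.map (fun p => sym :: p)) ++ [[]] =
          (pvCB (pvPos nullable (n + 1) rest) ++ [[]]).map (List.map (pvTempN n (sym :: rest))) := by
        rw [List.map_append, hkept]; rfl
      rw [hp]
      simp only [pvBuckets, h, if_true]
      rw [e1, e2]
      show _ = (List.zipWith (· ++ ·) _ _).map (List.map (pvTempN n (sym :: rest)))
      rw [List.map_zipWith, List.zipWith_map]
      simp [List.map_append]
    · have hp : pvPos nullable n (sym :: rest) = pvPos nullable (n + 1) rest := by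
        rw [pvPos_cons, if_neg h]
      rw [hp, ← hkept]
      rw [Bool.not_eq_true] at h
      simp only [pvBuckets, h, Bool.false_eq_true, if_false]

-- ===== VERDICT (by name: the statement is the Claim_ definition above) =====
theorem generate_nullable_variants_py_spec : Claim_equal_generate_nullable_variants_py := by
  intro rule nullable _
  show generate_nullable_variants_py rule nullable = generate_nullable_variants_py_alt rule nullable
  simp only [generate_nullable_variants_py, generate_nullable_variants_py_alt]
  rw [pvBuckets_char rule nullable 0, pvCB_eq]
  rw [show pvPos nullable 0 rule =
      ((PySem.List.enumerate rule 0).filter (fun p => nullable.contains p.2)).map (fun p => p.1) from rfl]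
  generalize ((PySem.List.enumerate rule 0).filter (fun p => nullable.contains p.2)).map (fun p => p.1) = ps
  have hrange : PySem.List.pyRange 0 ((ps.length : Int) + 1) 1 =
      (List.range (ps.length + 1)).map (fun k : Nat => (k : Int)) := by
    rw [PySem.List.pyRange_one]
    simp
  rw [hrange, List.foldl_map, List.map_map, List.foldl_map]
  simp only [Int.toNat_natCast, Function.comp_apply, List.foldl_map]
  rfl
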